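-- pv_equiv track=rewrite | github.com/Rutvik72/video-automation | builder.py | pickFontSize
-- ===== SOURCE A (Python) =====
-- def pickFontSize(clipWidth):
--     dictOfFontSize = {
--         600: 35,
--         700: 50,
--         900: 60,
--         1100: 80,
--         1500: 100,
--         2000: 125
--     }
--
--     for key in dictOfFontSize:
--         if clipWidth < key:
--             fontSize = dictOfFontSize[key]
--             break
--         else:
--             fontSize = 135
--
--     return fontSize
-- ===== SOURCE B (Python) =====
-- # Maps clip width to font size via binary search over sorted parallel arrays.
-- _THRESHOLDS = [600, 700, 900, 1100, 1500, 2000]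
-- _SIZES = [35, 50, 60, 80, 100, 125]
--
-- def pickFontSize(clipWidth):
--     # bisect_right: first index whose threshold is strictly greater than clipWidth
--     lo, hi = 0, len(_THRESHOLDS)
--     while lo < hi:
--         mid = (lo + hi) // 2
--         if clipWidth < _THRESHOLDS[mid]:
--             hi = mid
--         else:
--             lo = mid + 1
--     if lo < len(_THRESHOLDS):
--         return _SIZES[lo]
--     return 135
-- ===== Notes on version B (the rewrite author's own statement) =====
-- stated objective: alternative
-- what changed: Replaces A's linear scan over a dict of thresholds with a hand-written bisect_right binary search over sorted parallel threshold/size arrays.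
import Mathlib
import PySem

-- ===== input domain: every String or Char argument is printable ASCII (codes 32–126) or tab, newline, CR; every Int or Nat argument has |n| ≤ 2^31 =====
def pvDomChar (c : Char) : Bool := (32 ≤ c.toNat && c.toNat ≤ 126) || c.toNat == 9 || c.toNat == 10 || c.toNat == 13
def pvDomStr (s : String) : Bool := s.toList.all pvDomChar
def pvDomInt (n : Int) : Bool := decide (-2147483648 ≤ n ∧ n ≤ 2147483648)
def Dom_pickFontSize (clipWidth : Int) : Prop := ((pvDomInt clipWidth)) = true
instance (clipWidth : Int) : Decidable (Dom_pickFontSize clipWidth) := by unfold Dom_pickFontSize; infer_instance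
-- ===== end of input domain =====

-- ===== PORT A =====
-- B replaces A's linear dict scan with a binary search over sorted parallel arrays (alternative decomposition).
-- loop over the dict's (key,value) pairs; fontSize starts unassigned but the list is nonempty, 135 stands for the else-branch assignment
def pickFontSizeLoop (pairs : List (Int × Int)) (clipWidth : Int) (fontSize : Int) : Int :=
  match pairs with
  | [] => fontSize
  | (k, v) :: rest => if clipWidth < k then v else pickFontSizeLoop rest clipWidth 135

def pickFontSize (clipWidth : Int) : Int :=
  pickFontSizeLoop [(600, 35), (700, 50), (900, 60), (1100, 80), (1500, 100), (2000, 125)] clipWidth 135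

-- ===== PORT B =====
def pvThresholds : List Int := [600, 700, 900, 1100, 1500, 2000]
def pvSizes : List Int := [35, 50, 60, 80, 100, 125]

-- hand-written bisect_right while-loop from Source B, as lo/hi recursion
def pvBisectRight (clipWidth : Int) (lo hi : Nat) : Nat :=
  if lo < hi then
    let mid := (lo + hi) / 2
    if clipWidth < pvThresholds.getD mid 0 then pvBisectRight clipWidth lo mid
    else pvBisectRight clipWidth (mid + 1) hi
  else lo
termination_by hi - lo

def pickFontSize_alt (clipWidth : Int) : Int :=
  let lo := pvBisectRight clipWidth 0 pvThresholds.length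
  if lo < pvThresholds.length then pvSizes.getD lo 0 else 135

-- ===== PRECONDITION & SPEC =====
def Spec_pickFontSize (clipWidth : Int) (out : Int) : Prop := out = pickFontSize_alt clipWidth
instance (clipWidth : Int) (out : Int) : Decidable (Spec_pickFontSize clipWidth out) := by unfold Spec_pickFontSize; infer_instance

-- ===== CLAIM (what is proved, stated in full; the proofs are below) =====
def Claim_equal_pickFontSize : Prop := ∀ (clipWidth : Int), Dom_pickFontSize clipWidth → Spec_pickFontSize clipWidth (pickFontSize clipWidth)

-- ===== LEMMAS AND PROOFS =====

-- ===== VERDICT (by name: the statement is the Claim_ definition above) =====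
theorem pickFontSize_spec : Claim_equal_pickFontSize := by
  intro w _
  unfold Spec_pickFontSize pickFontSize pickFontSize_alt pickFontSizeLoop
  by_cases h1 : w < 600 <;> by_cases h2 : w < 700 <;> by_cases h3 : w < 900 <;>
    by_cases h4 : w < 1100 <;> by_cases h5 : w < 1500 <;> by_cases h6 : w < 2000 <;>
    simp only [pickFontSizeLoop, h1, h2, h3, h4, h5, h6, if_true, if_false] <;>
    first
      | omega
      | (rw [show pvBisectRight w 0 pvThresholds.length = 0 by
            rw [pvBisectRight]; norm_num [pvThresholds, List.getD];
            rw [if_pos (by omega), pvBisectRight]; norm_num [pvThresholds, List.getD];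
            rw [if_pos (by omega), pvBisectRight]; norm_num [pvThresholds, List.getD];
            rw [if_pos (by omega), pvBisectRight]; norm_num [pvThresholds, List.getD]];
           norm_num [pvThresholds, pvSizes, List.getD])
      | (rw [show pvBisectRight w 0 pvThresholds.length = 1 by
            rw [pvBisectRight]; norm_num [pvThresholds, List.getD];
            rw [if_pos (by omega), pvBisectRight]; norm_num [pvThresholds, List.getD];
            rw [if_pos (by omega), pvBisectRight]; norm_num [pvThresholds, List.getD];
            rw [if_neg (by omega), pvBisectRight]; norm_num [pvThresholds, List.getD]];
           norm_num [pvThresholds, pvSizes, List.getD])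
      | (rw [show pvBisectRight w 0 pvThresholds.length = 2 by
            rw [pvBisectRight]; norm_num [pvThresholds, List.getD];
            rw [if_pos (by omega), pvBisectRight]; norm_num [pvThresholds, List.getD];
            rw [if_neg (by omega), pvBisectRight]; norm_num [pvThresholds, List.getD];
            rw [if_pos (by omega), pvBisectRight]; norm_num [pvThresholds, List.getD]];
           norm_num [pvThresholds, pvSizes, List.getD])
      | (rw [show pvBisectRight w 0 pvThresholds.length = 3 by
            rw [pvBisectRight]; norm_num [pvThresholds, List.getD];
            rw [if_pos (by omega), pvBisectRight]; norm_num [pvThresholds, List.getD];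
            rw [if_neg (by omega), pvBisectRight]; norm_num [pvThresholds, List.getD];
            rw [if_neg (by omega), pvBisectRight]; norm_num [pvThresholds, List.getD]];
           norm_num [pvThresholds, pvSizes, List.getD])
      | (rw [show pvBisectRight w 0 pvThresholds.length = 4 by
            rw [pvBisectRight]; norm_num [pvThresholds, List.getD];
            rw [if_neg (by omega), pvBisectRight]; norm_num [pvThresholds, List.getD];
            rw [if_pos (by omega), pvBisectRight]; norm_num [pvThresholds, List.getD];
            rw [if_pos (by omega), pvBisectRight]; norm_num [pvThresholds, List.getD]];
           norm_num [pvThresholds, pvSizes, List.getD])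
      | (rw [show pvBisectRight w 0 pvThresholds.length = 5 by
            rw [pvBisectRight]; norm_num [pvThresholds, List.getD];
            rw [if_neg (by omega), pvBisectRight]; norm_num [pvThresholds, List.getD];
            rw [if_pos (by omega), pvBisectRight]; norm_num [pvThresholds, List.getD];
            rw [if_neg (by omega), pvBisectRight]; norm_num [pvThresholds, List.getD]];
           norm_num [pvThresholds, pvSizes, List.getD])
      | (rw [show pvBisectRight w 0 pvThresholds.length = 6 by
            rw [pvBisectRight]; norm_num [pvThresholds, List.getD];
            rw [if_neg (by omega), pvBisectRight]; norm_num [pvThresholds, List.getD];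
            rw [if_neg (by omega), pvBisectRight]; norm_num [pvThresholds, List.getD]];
           norm_num [pvThresholds, pvSizes, List.getD])
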